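-- pv_equiv track=rewrite | github.com/CoderXAndZ/PycharmProjects | AllProjects/Projects/ChangeIp/MacGetIPAddress.py | genIP
-- ===== SOURCE A (Python) =====
-- def genIP(data):
--     new_line = ''
--     lines = []
--     for line in data:
--          if line[0].strip():
--             lines.append(new_line)
--             new_line = line + '\n'
--          else:
--             new_line += line + '\n'
--     lines.append(new_line)
--     return [i for i in lines if i and not i.startswith('lo')]
-- ===== SOURCE B (Python) =====
-- def genIP(data):
--     # Reverse traversal: walk the lines back-to-front, collecting each block's
--     # lines in a list and closing a block whenever its header line is reached;
--     # the leftover trailing lines form the preamble block. Blocks are then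
--     # reversed into original order and filtered like A does.
--     def is_header(line):
--         return bool(line[0].strip())
--
--     def render(seg):
--         return ''.join(l + '\n' for l in reversed(seg))
--
--     blocks = []
--     seg = []
--     for line in reversed(list(data)):
--         seg.append(line)
--         if is_header(line):
--             blocks.append(render(seg))
--             seg = []
--     blocks.append(render(seg))
--     blocks.reverse()
--     return [i for i in blocks if i and not i.startswith('lo')]
-- ===== Notes on version B (the rewrite author's own statement) =====
-- stated objective: alternative
-- what changed: A accumulates each block incrementally in a growing string while scanning forward; B traverses the lines back-to-front, collecting each block's lines in a list that is closed at its header line, then reverses the block list and renders each block with ''.join.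
import Mathlib
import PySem

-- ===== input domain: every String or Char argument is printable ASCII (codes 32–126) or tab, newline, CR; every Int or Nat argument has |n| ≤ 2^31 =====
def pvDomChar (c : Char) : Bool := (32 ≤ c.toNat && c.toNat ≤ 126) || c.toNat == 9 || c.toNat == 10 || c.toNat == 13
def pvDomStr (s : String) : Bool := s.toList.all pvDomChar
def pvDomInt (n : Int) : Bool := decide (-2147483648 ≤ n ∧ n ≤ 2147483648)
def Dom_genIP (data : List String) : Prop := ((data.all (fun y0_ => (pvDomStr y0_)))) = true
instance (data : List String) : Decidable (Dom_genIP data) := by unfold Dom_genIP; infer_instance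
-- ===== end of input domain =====

-- B traverses the lines back-to-front and closes a block at each header line, instead of A's
-- forward scan with an incremental string accumulator; same cost, different decomposition.

-- ===== PORT A =====
-- A's forward scan: (new_line, lines) accumulator; `line[0]` is exact under Pre_ (no empty line).
def genIP (data : List String) : List String :=
  let st := data.foldl
    (fun (acc : String × List String) line =>
      if !(PySem.Chars.strip [PySem.List.pyGetD line.toList 0 ' ']).isEmpty then
        (line ++ "\n", acc.2 ++ [acc.1])
      else
        (acc.1 ++ line ++ "\n", acc.2))
    ("", [])
  (st.2 ++ [st.1]).filter (fun i => !(i == "") && !(PySem.Str.startswith i "lo"))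

-- ===== PORT B =====
def bIsHeader (line : String) : Bool :=
  !(PySem.Chars.strip [PySem.List.pyGetD line.toList 0 ' ']).isEmpty

def bRender (seg : List String) : String :=
  PySem.Str.join "" (seg.reverse.map (fun l => l ++ "\n"))

def genIP_alt (data : List String) : List String :=
  let st := data.reverse.foldl
    (fun (acc : List String × List String) line =>
      let seg := acc.2 ++ [line]
      if bIsHeader line then (acc.1 ++ [bRender seg], []) else (acc.1, seg))
    ([], [])
  let blocks := (st.1 ++ [bRender st.2]).reverse
  blocks.filter (fun i => !(i == "") && !(PySem.Str.startswith i "lo"))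

-- ===== PRECONDITION & SPEC =====
-- Pre_ excludes inputs containing an empty line, on which Python A raises IndexError at line[0].
def Pre_genIP (data : List String) : Prop := ∀ s ∈ data, s ≠ ""
instance (data : List String) : Decidable (Pre_genIP data) := by unfold Pre_genIP; infer_instance
def pvWitness_genIP : List String :=
  ["eth0: flags=abc", "  inet 10.0.0.2", "lo0: flags=xyz", "  inet 127.0.0.1"]

def Spec_genIP (data : List String) (out : List String) : Prop := out = genIP_alt data
instance (data : List String) (out : List String) : Decidable (Spec_genIP data out) := by unfold Spec_genIP; infer_instance

-- ===== CLAIM (what is proved, stated in full; the proofs are below) =====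
def Claim_equal_genIP : Prop := ∀ (data : List String), Dom_genIP data → Pre_genIP data → Spec_genIP data (genIP data)

-- ===== LEMMAS AND PROOFS =====

-- proof-only helpers: segmentation of the line list and block rendering
def nhB (l : String) : Bool := !bIsHeader l

def rend (seg : List String) : String := PySem.Str.join "" (seg.map (fun l => l ++ "\n"))

def segs : List String → List (List String)
  | [] => []
  | x :: t => (x :: t.takeWhile nhB) :: segs (t.dropWhile nhB)
  termination_by l => l.length
  decreasing_by simp only [List.length_cons, Nat.lt_succ_iff]; exact List.length_dropWhile_le _ _

theorem inter_nil_flatten (l : List (List Char)) :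
    (List.intersperse [] l).flatten = l.flatten := by
  induction l with
  | nil => simp
  | cons a t ih =>
    cases t with
    | nil => simp
    | cons b u => rw [List.intersperse_cons₂]; simp only [List.flatten_cons] at ih ⊢; simp [ih]

theorem rend_eq_ofList (s : List String) :
    rend s = String.ofList ((s.map (fun l => l.toList ++ ['\n'])).flatten) := by
  have h : "\n".toList = ['\n'] := by decide
  simp [rend, PySem.Str.join, PySem.Chars.join, List.intercalate, inter_nil_flatten]
  congr 1
  simp [Function.comp_def, h]

theorem rend_nil : rend [] = "" := by
  simp [rend_eq_ofList]

theorem rend_cons (x : String) (s : List String) : rend (x :: s) = x ++ "\n" ++ rend s := by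
  rw [rend_eq_ofList, rend_eq_ofList, List.map_cons, List.flatten_cons, String.ofList_append,
    String.ofList_append, String.ofList_toList]

theorem bRender_eq (s : List String) : bRender s = rend s.reverse := by
  simp [bRender, rend]

def stepA (acc : String × List String) (line : String) : String × List String :=
  if !(PySem.Chars.strip [PySem.List.pyGetD line.toList 0 ' ']).isEmpty then
    (line ++ "\n", acc.2 ++ [acc.1])
  else
    (acc.1 ++ line ++ "\n", acc.2)

theorem foldA_eq (data : List String) : ∀ (a : String) (ls : List String),
    ((data.foldl stepA (a, ls)).2 ++ [(data.foldl stepA (a, ls)).1]) =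
      ls ++ (a ++ rend (data.takeWhile nhB)) :: (segs (data.dropWhile nhB)).map rend := by
  induction data with
  | nil => intro a ls; simp [segs, rend_nil]
  | cons x t ih =>
    intro a ls
    rw [List.foldl_cons]
    by_cases hc : (!(PySem.Chars.strip [PySem.List.pyGetD x.toList 0 ' ']).isEmpty) = true
    · have hb : bIsHeader x = true := hc
      have hnh : nhB x = false := by simp [nhB, hb]
      have hstep : stepA (a, ls) x = (x ++ "\n", ls ++ [a]) := by simp [stepA, hc]
      rw [hstep, ih, List.takeWhile_cons, List.dropWhile_cons, hnh]
      simp only [Bool.false_eq_true, if_false]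
      rw [segs]
      simp [rend_nil, rend_cons, String.append_assoc]
    · have hb : bIsHeader x = false := by
        simp only [bIsHeader, Bool.not_eq_true'] at hc ⊢
        simpa using hc
      have hnh : nhB x = true := by simp [nhB, hb]
      have hstep : stepA (a, ls) x = (a ++ x ++ "\n", ls) := by simp [stepA, hc]
      rw [hstep, ih, List.takeWhile_cons, List.dropWhile_cons, hnh]
      simp [rend_cons, String.append_assoc]

def stepB (acc : List String × List String) (line : String) : List String × List String :=
  let seg := acc.2 ++ [line]
  if bIsHeader line then (acc.1 ++ [bRender seg], []) else (acc.1, seg)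

theorem foldB_eq (data : List String) :
    data.reverse.foldl stepB ([], []) =
      (((segs (data.dropWhile nhB)).map rend).reverse, (data.takeWhile nhB).reverse) := by
  induction data with
  | nil => simp [segs]
  | cons x t ih =>
    rw [List.reverse_cons, List.foldl_append, ih]
    by_cases hx : bIsHeader x = true
    · have hnh : nhB x = false := by simp [nhB, hx]
      rw [List.takeWhile_cons, List.dropWhile_cons, hnh]
      simp only [Bool.false_eq_true, if_false]
      rw [segs]
      simp [stepB, hx, bRender_eq, List.map_cons]
    · have hnh : nhB x = true := by simp [nhB, hx]
      rw [List.takeWhile_cons, List.dropWhile_cons, hnh]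
      simp [stepB, hx]

-- ===== VERDICT (by name: the statement is the Claim_ definition above) =====
theorem genIP_spec : Claim_equal_genIP := by
  intro data _ _
  unfold Spec_genIP genIP genIP_alt
  rw [show (fun (acc : String × List String) line =>
      if !(PySem.Chars.strip [PySem.List.pyGetD line.toList 0 ' ']).isEmpty then
        (line ++ "\n", acc.2 ++ [acc.1])
      else
        (acc.1 ++ line ++ "\n", acc.2)) = stepA from rfl]
  rw [show (fun (acc : List String × List String) line =>
      let seg := acc.2 ++ [line]
      if bIsHeader line then (acc.1 ++ [bRender seg], []) else (acc.1, seg)) = stepB from rfl]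
  rw [foldB_eq]
  simp only [foldA_eq data "" [], List.nil_append]
  rw [bRender_eq, List.reverse_reverse]
  simp [String.empty_append]
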